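-- pv_equiv track=rewrite | github.com/intuitem/ciso-assistant-community | tools/excel/3cf/tools/3cf-v3.1_framework_builder.py | implementation_groups_from_refs
-- ===== SOURCE A (Python) =====
-- def implementation_groups_from_refs(ref_lines: list[str]) -> str | None:
--     has_sec = any(line.strip().startswith("IS.I/D.OR") for line in ref_lines)
--     has_sur = any(
--         any(marker in line for marker in ("AIM", "Règlement (UE)", "Code des transports"))
--         for line in ref_lines
--     )
--     if has_sec and has_sur:
--         return "sec,sur"
--     if has_sec:
--         return "sec"
--     if has_sur:
--         return "sur"
--     return None
-- ===== SOURCE B (Python) =====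
-- _SUR_MARKERS = ("AIM", "R\u00e8glement (UE)", "Code des transports")
-- _TABLE = (None, "sur", "sec", "sec,sur")
--
--
-- def _line_mask(line: str) -> int:
--     m = 0
--     if line.strip().startswith("IS.I/D.OR"):
--         m |= 2
--     if any(marker in line for marker in _SUR_MARKERS):
--         m |= 1
--     return m
--
--
-- def implementation_groups_from_refs(ref_lines: list[str]) -> str | None:
--     mask = 0
--     for line in ref_lines:
--         mask |= _line_mask(line)
--         if mask == 3:
--             break
--     return _TABLE[mask]
-- ===== Notes on version B (the rewrite author's own statement) =====
-- stated objective: alternative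
-- what changed: B replaces A's two any() scans plus four-way if-cascade by a bitmask formulation: each line is classified once into a bitmask (2=sec, 1=sur), masks are OR-folded over the list with an early exit at 3, and the result is read from a constant lookup table indexed by the mask, so the boolean cascade disappears.
import Mathlib
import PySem

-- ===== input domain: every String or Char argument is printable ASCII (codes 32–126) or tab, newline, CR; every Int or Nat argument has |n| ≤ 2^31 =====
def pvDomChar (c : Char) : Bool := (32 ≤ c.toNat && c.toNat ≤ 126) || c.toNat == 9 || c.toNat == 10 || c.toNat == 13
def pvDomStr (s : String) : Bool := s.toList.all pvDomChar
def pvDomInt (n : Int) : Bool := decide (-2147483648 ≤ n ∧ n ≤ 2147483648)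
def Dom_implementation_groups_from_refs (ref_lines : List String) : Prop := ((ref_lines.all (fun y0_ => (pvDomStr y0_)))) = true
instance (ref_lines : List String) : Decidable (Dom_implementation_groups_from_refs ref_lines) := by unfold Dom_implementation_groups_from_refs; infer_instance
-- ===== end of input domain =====

-- B replaces A's two any() scans and boolean if-cascade by a per-line bitmask OR-folded over the list with a table lookup (alternative decomposition, same cost).


-- ===== PORT A =====
def implementation_groups_from_refs (ref_lines : List String) : Option String :=
  let has_sec := ref_lines.any (fun line => PySem.Str.startswith (PySem.Str.strip line) "IS.I/D.OR")
  let has_sur := ref_lines.any (fun line =>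
    (["AIM", "Règlement (UE)", "Code des transports"] : List String).any (fun marker => PySem.Str.isIn marker line))
  if has_sec && has_sur then some "sec,sur"
  else if has_sec then some "sec"
  else if has_sur then some "sur"
  else none

-- ===== PORT B =====
-- Source B: per-line bitmask (2 = sec, 1 = sur), OR-folded with an early exit at 3, result read from a table.
def surMarkers : List String := ["AIM", "Règlement (UE)", "Code des transports"]

def igTable : List (Option String) := [none, some "sur", some "sec", some "sec,sur"]

def lineMask (line : String) : Nat :=
  let m : Nat := 0
  let m := if PySem.Str.startswith (PySem.Str.strip line) "IS.I/D.OR" then m ||| 2 else m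
  let m := if surMarkers.any (fun marker => PySem.Str.isIn marker line) then m ||| 1 else m
  m

def maskLoop : List String → Nat → Nat
  | [], mask => mask
  | line :: rest, mask =>
    let mask' := mask ||| lineMask line
    if mask' == 3 then mask' else maskLoop rest mask'

def implementation_groups_from_refs_alt (ref_lines : List String) : Option String :=
  -- _TABLE[mask]: mask is always < 4, so the Python indexing never raises; getD is exact here
  igTable.getD (maskLoop ref_lines 0) none

-- ===== PRECONDITION & SPEC =====
def Spec_implementation_groups_from_refs (ref_lines : List String) (out : Option String) : Prop := out = implementation_groups_from_refs_alt ref_lines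
instance (ref_lines : List String) (out : Option String) : Decidable (Spec_implementation_groups_from_refs ref_lines out) := by unfold Spec_implementation_groups_from_refs; infer_instance

-- ===== CLAIM (what is proved, stated in full; the proofs are below) =====
def Claim_equal_implementation_groups_from_refs : Prop := ∀ (ref_lines : List String), Dom_implementation_groups_from_refs ref_lines → Spec_implementation_groups_from_refs ref_lines (implementation_groups_from_refs ref_lines)

-- ===== LEMMAS AND PROOFS =====
-- encode a (sec, sur) boolean pair as the bitmask Source B uses
def enc (s u : Bool) : Nat := (if s then 2 else 0) + (if u then 1 else 0)

lemma enc_or (s u s' u' : Bool) : enc s u ||| enc s' u' = enc (s || s') (u || u') := by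
  cases s <;> cases u <;> cases s' <;> cases u' <;> decide

lemma lineMask_eq (line : String) :
    lineMask line = enc (PySem.Str.startswith (PySem.Str.strip line) "IS.I/D.OR")
      (surMarkers.any (fun marker => PySem.Str.isIn marker line)) := by
  unfold lineMask enc
  cases PySem.Str.startswith (PySem.Str.strip line) "IS.I/D.OR" <;>
    cases surMarkers.any (fun marker => PySem.Str.isIn marker line) <;> simp

lemma enc_beq3 (s u : Bool) : (enc s u == 3) = (s && u) := by
  cases s <;> cases u <;> decide

lemma maskLoop_eq (xs : List String) (s u : Bool) :
    maskLoop xs (enc s u) =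
      enc (s || xs.any (fun line => PySem.Str.startswith (PySem.Str.strip line) "IS.I/D.OR"))
          (u || xs.any (fun line => surMarkers.any (fun marker => PySem.Str.isIn marker line))) := by
  induction xs generalizing s u with
  | nil => simp [maskLoop]
  | cons l rest ih =>
    simp only [maskLoop, List.any_cons, lineMask_eq, enc_or, enc_beq3]
    cases ha : (s || PySem.Str.startswith (PySem.Str.strip l) "IS.I/D.OR") <;>
      cases hb : (u || surMarkers.any (fun marker => PySem.Str.isIn marker l)) <;>
        rw [← Bool.or_assoc, ← Bool.or_assoc, ha, hb] <;>
        split_ifs with h <;>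
        first
          | rfl
          | (rw [ih])
          | (simp at h)

-- ===== VERDICT (by name: the statement is the Claim_ definition above) =====
theorem implementation_groups_from_refs_spec : Claim_equal_implementation_groups_from_refs := by
  intro ref_lines _
  unfold Spec_implementation_groups_from_refs implementation_groups_from_refs implementation_groups_from_refs_alt
  have h0 : (0 : Nat) = enc false false := rfl
  rw [h0, maskLoop_eq]
  simp only [Bool.false_or, surMarkers]
  cases ref_lines.any (fun line => PySem.Str.startswith (PySem.Str.strip line) "IS.I/D.OR") <;>
    cases ref_lines.any (fun line =>
        (["AIM", "Règlement (UE)", "Code des transports"] : List String).any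
          (fun marker => PySem.Str.isIn marker line)) <;>
      rfl
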